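-- pv_equiv track=rewrite | github.com/Jojan-Esteban-Serna/game-of-life | utils/WorldLoader.py | parse
-- ===== SOURCE A (Python) =====
-- class CRLF:
--     def __repr__(self):
--         return "CRLF"
--
-- class EOF:
--     def __repr__(self):
--         return "EOF"
--
-- def parse(tokens):
--     preparsed = []
--     for i in range(len(tokens)):
--         if tokens[i].isdigit():
--             tokens[i] = int(tokens[i])
--             preparsed.append(tokens[i])
--
--         if tokens[i] == 'o':
--             if (i > 0 and isinstance(tokens[i - 1], str)) or i == 0:
--                 preparsed.append(1)
--             preparsed.append(True)
--
--         if tokens[i] == 'b':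
--             if (i > 0 and isinstance(tokens[i - 1], str)) or i == 0:
--                 preparsed.append(1)
--             preparsed.append(False)
--
--         if tokens[i] == '$':
--             if i > 0 and isinstance(tokens[i - 1], str):
--                 preparsed.append(1)
--             preparsed.append(CRLF())
--
--         if tokens[i] == '!':
--             preparsed.append(1)
--             preparsed.append(EOF())
--             break
--     if tokens[-1] != '!':
--         preparsed.append(1)
--         preparsed.append(EOF())
--
--     matrix = []
--     row = []
--     for i in range(len(preparsed)):
--         if isinstance(preparsed[i], int) and isinstance(preparsed[i + 1], bool):
--             row += preparsed[i] * [preparsed[i + 1]]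
--         if isinstance(preparsed[i], CRLF) or isinstance(preparsed[i], EOF):
--             matrix.append(row)
--             matrix += [[]]*(preparsed[i-1]-1)
--             row = []
--
--     return matrix
-- ===== SOURCE B (Python) =====
-- def parse(tokens):
--     # Single pass, no sentinel stream. Return value only: unlike A, this does
--     # not mutate `tokens` in place.
--     matrix = []
--     row = []
--     count = 1  # pending run length: set by a digit token, reset by any other
--     for t in tokens:
--         if t.isdigit():
--             count = int(t)
--             continue
--         if t == 'o':
--             row += count * [True]
--         elif t == 'b':
--             row += count * [False]
--         elif t == '$':
--             matrix.append(row)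
--             matrix += (count - 1) * [[]]
--             row = []
--         elif t == '!':
--             matrix.append(row)
--             row = []
--             break
--         count = 1
--     if not tokens or tokens[-1] != '!':
--         matrix.append(row)
--     return matrix
-- ===== Notes on version B (the rewrite author's own statement) =====
-- stated objective: simpler
-- what changed: Replaces A's two passes (build a sentinel stream of ints/bools/CRLF/EOF markers with implicit count-1 insertion, then scan adjacent pairs of it) with one direct pass over the tokens that keeps a pending run-count and emits matrix rows immediately; B also does not mutate the input list.
-- outside the precondition, e.g. on parse([]): A raises IndexError, B returns [[]]; on parse(['$', 'o', '!']): A raises TypeError, B returns [[], [True]]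
import Mathlib
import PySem

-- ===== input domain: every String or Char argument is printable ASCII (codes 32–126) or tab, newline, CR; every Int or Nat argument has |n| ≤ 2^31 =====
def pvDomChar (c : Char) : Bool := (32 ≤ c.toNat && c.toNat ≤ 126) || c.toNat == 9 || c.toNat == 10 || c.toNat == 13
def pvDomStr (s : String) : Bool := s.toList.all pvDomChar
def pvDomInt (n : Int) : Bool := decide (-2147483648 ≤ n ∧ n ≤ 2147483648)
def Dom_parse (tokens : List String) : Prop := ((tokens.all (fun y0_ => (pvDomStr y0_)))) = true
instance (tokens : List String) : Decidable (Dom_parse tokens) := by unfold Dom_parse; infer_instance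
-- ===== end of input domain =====

-- B replaces A's two-pass sentinel-stream parse by one direct pass (simpler decomposition,
-- same cost); return value only: A mutates digit entries of `tokens` in place, B does not.

-- ===== PORT A =====
-- Elements of A's `preparsed` list: Python int / bool / CRLF() / EOF().
inductive PP where
  | i (n : Int)
  | b (v : Bool)
  | crlf
  | eof
deriving DecidableEq, Repr

-- int(t) for a digit token (strIsdigit t → ofStr? is some, so the default is never used)
def intOf (t : String) : Int := (PySem.Int.ofStr? t).getD 0

-- Python `isinstance(x, int)` on a preparsed element (True for bools too).
def ppIsInt : PP → Bool
  | PP.i _ => true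
  | PP.b _ => true
  | _ => false

-- the int value of an element passing ppIsInt (True == 1, False == 0)
def ppToInt : PP → Int
  | PP.i n => n
  | PP.b v => if v then 1 else 0
  | _ => 0   -- unreachable under ppIsInt

-- preparsed[i-1] - 1: `none` is i == 0, where Python wraps to preparsed[-1] = EOF and
-- raises TypeError (excluded by Pre_; value arbitrary); crlf/eof would likewise raise
-- TypeError (never reached inside Pre_).
def ppPrevInt : Option PP → Int
  | some (PP.i n) => n
  | some (PP.b v) => if v then 1 else 0
  | _ => 1

-- First loop of A: builds `preparsed`. The in-place mutation tokens[i] = int(tokens[i])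
-- is modeled by the flag `prevStr` (false ⇔ the previous token was a digit, hence now an
-- int); the mutated list is only read back through isinstance(tokens[i-1], str) and
-- tokens[-1] != '!', and a token mutated to int never equals '!' (it was a digit string).
def loopA : List String → Bool → Bool → List PP → List PP
  | [], _, _, acc => acc
  | t :: rest, isFirst, prevStr, acc =>
    let acc := if PySem.Str.strIsdigit t then acc ++ [PP.i (intOf t)] else acc
    let acc := if t = "o" then
        (if (!isFirst && prevStr) || isFirst then acc ++ [PP.i 1] else acc) ++ [PP.b true]
      else acc
    let acc := if t = "b" then
        (if (!isFirst && prevStr) || isFirst then acc ++ [PP.i 1] else acc) ++ [PP.b false]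
      else acc
    let acc := if t = "$" then
        (if !isFirst && prevStr then acc ++ [PP.i 1] else acc) ++ [PP.crlf]
      else acc
    if t = "!" then acc ++ [PP.i 1, PP.eof]
    else loopA rest false (!(PySem.Str.strIsdigit t)) acc

-- Second loop of A over `preparsed`, carrying prev = preparsed[i-1]; the lookahead
-- preparsed[i+1] is rest.head?.  Python's n * [x] (empty for n ≤ 0) is replicate n.toNat.
def loopM : List PP → Option PP → List Bool → List (List Bool) → List (List Bool)
  | [], _, _, matrix => matrix
  | c :: rest, prev, row, matrix =>
    let row := match rest.head? with
      | some (PP.b v) =>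
          if ppIsInt c then row ++ List.replicate (ppToInt c).toNat v else row
      | _ => row
    match c with
    | PP.crlf => loopM rest (some PP.crlf) []
        (matrix ++ [row] ++ List.replicate (ppPrevInt prev - 1).toNat [])
    | PP.eof => loopM rest (some PP.eof) []
        (matrix ++ [row] ++ List.replicate (ppPrevInt prev - 1).toNat [])
    | c => loopM rest (some c) row matrix

def parse (tokens : List String) : List (List Bool) :=
  let preparsed := loopA tokens true false []
  -- tokens[-1] != '!' on the (partly mutated) list; an int entry never equals '!'
  let preparsed := if tokens.getLast? = some "!" then preparsed
    else preparsed ++ [PP.i 1, PP.eof]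
  loopM preparsed none [] []

-- ===== PORT B =====
-- the single pass of Source B; returns (matrix, row) as the loop leaves them (break at '!')
def goB : List String → Int → List Bool → List (List Bool) → List (List Bool) × List Bool
  | [], _, row, matrix => (matrix, row)
  | t :: rest, count, row, matrix =>
    if PySem.Str.strIsdigit t then goB rest (intOf t) row matrix
    else if t = "o" then goB rest 1 (row ++ List.replicate count.toNat true) matrix
    else if t = "b" then goB rest 1 (row ++ List.replicate count.toNat false) matrix
    else if t = "$" then
      goB rest 1 [] (matrix ++ [row] ++ List.replicate (count - 1).toNat [])
    else if t = "!" then (matrix ++ [row], [])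
    else goB rest 1 row matrix

def parse_alt (tokens : List String) : List (List Bool) :=
  let st := goB tokens 1 [] []
  if tokens.getLast? = some "!" then st.1 else st.1 ++ [st.2]

-- ===== PRECONDITION & SPEC =====
-- Pre_ excludes exactly the inputs where A raises: the empty list (IndexError at
-- tokens[-1]) and a first token '$' (TypeError: EOF - 1 via preparsed[-1] wraparound).
def Pre_parse (tokens : List String) : Prop :=
  tokens ≠ [] ∧ tokens.head? ≠ some "$"
instance (tokens : List String) : Decidable (Pre_parse tokens) := by
  unfold Pre_parse; infer_instance

def pvWitness_parse : List String := ["3", "o", "$", "2", "b", "!"]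

def Spec_parse (tokens : List String) (out : List (List Bool)) : Prop := out = parse_alt tokens
instance (tokens : List String) (out : List (List Bool)) : Decidable (Spec_parse tokens out) := by unfold Spec_parse; infer_instance

-- ===== CLAIM (what is proved, stated in full; the proofs are below) =====
def Claim_equal_parse : Prop := ∀ (tokens : List String), Dom_parse tokens → Pre_parse tokens → Spec_parse tokens (parse tokens)

-- ===== LEMMAS AND PROOFS =====

-- prev-state form of A's second loop: the run extension preparsed[i] * [preparsed[i+1]]
-- is charged to the position of the bool instead of the position of the int.
def extP (p : Option PP) (h : Option PP) : List Bool :=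
  match h with
  | some (PP.b v) =>
    match p with
    | some q => if ppIsInt q then List.replicate (ppToInt q).toNat v else []
    | none => []
  | _ => []

def stepP (s : Option PP × List Bool × List (List Bool)) (c : PP) :
    Option PP × List Bool × List (List Bool) :=
  match c with
  | PP.crlf => (some PP.crlf, [], s.2.2 ++ [s.2.1] ++ List.replicate (ppPrevInt s.1 - 1).toNat [])
  | PP.eof => (some PP.eof, [], s.2.2 ++ [s.2.1] ++ List.replicate (ppPrevInt s.1 - 1).toNat [])
  | PP.b v => (some (PP.b v),
      (match s.1 with
       | some q => if ppIsInt q then s.2.1 ++ List.replicate (ppToInt q).toNat v else s.2.1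
       | none => s.2.1), s.2.2)
  | PP.i n => (some (PP.i n), s.2.1, s.2.2)

def runP (l : List PP) (s : Option PP × List Bool × List (List Bool)) :
    Option PP × List Bool × List (List Bool) :=
  l.foldl stepP s

theorem extP_i (p : Option PP) (n : Int) : extP p (some (PP.i n)) = [] := rfl
theorem extP_crlf (p : Option PP) : extP p (some PP.crlf) = [] := rfl
theorem extP_eof (p : Option PP) : extP p (some PP.eof) = [] := rfl
theorem extP_none (h : Option PP) : extP none h = [] := by
  cases h with
  | none => rfl
  | some d => cases d <;> rfl
theorem extP_not_int (q : PP) (h : Option PP) (hq : ppIsInt q = false) :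
    extP (some q) h = [] := by
  cases h with
  | none => rfl
  | some d => cases d <;> simp [extP, hq]

theorem rowUpd_eq (R : List Bool) (c : PP) (h : Option PP) :
    (match h with
     | some (PP.b v) => if ppIsInt c then R ++ List.replicate (ppToInt c).toNat v else R
     | _ => R) = R ++ extP (some c) h := by
  cases h with
  | none => simp [extP]
  | some d => cases d <;> simp [extP] <;> split_ifs <;> simp

theorem runP_cons (c : PP) (l : List PP) (s : Option PP × List Bool × List (List Bool)) :
    runP (c :: l) s = runP l (stepP s c) := rfl

theorem bridge (l : List PP) : ∀ (p : Option PP) (row : List Bool) (mat : List (List Bool)),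
    loopM l p (row ++ extP p l.head?) mat = (runP l (p, row, mat)).2.2 := by
  induction l with
  | nil => intro p row mat; simp [loopM, runP]
  | cons c rest ih =>
    intro p row mat
    simp only [loopM, List.head?_cons, rowUpd_eq]
    cases c with
    | i n =>
      rw [runP_cons]
      simpa [extP_i, stepP] using ih (some (PP.i n)) row mat
    | b v =>
      rw [runP_cons]
      have hr : row ++ extP p (some (PP.b v)) = (stepP (p, row, mat) (PP.b v)).2.1 := by
        cases p <;> simp [extP, stepP] <;> split_ifs <;> simp
      rw [hr]
      exact ih (some (PP.b v)) (stepP (p, row, mat) (PP.b v)).2.1 mat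
    | crlf =>
      rw [runP_cons]
      rw [extP_not_int PP.crlf rest.head? rfl, List.append_nil, extP_crlf, List.append_nil]
      have h := ih (some PP.crlf) [] (mat ++ [row] ++ List.replicate (ppPrevInt p - 1).toNat [])
      rw [extP_not_int PP.crlf rest.head? rfl, List.append_nil] at h
      exact h
    | eof =>
      rw [runP_cons]
      rw [extP_not_int PP.eof rest.head? rfl, List.append_nil, extP_eof, List.append_nil]
      have h := ih (some PP.eof) [] (mat ++ [row] ++ List.replicate (ppPrevInt p - 1).toNat [])
      rw [extP_not_int PP.eof rest.head? rfl, List.append_nil] at h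
      exact h

-- one unfolding lemma per token class (isFirst = false, as inside the loop)
theorem loopA_cons_digit (t : String) (rs : List String) (p : Bool) (acc : List PP)
    (h : PySem.Chars.strIsdigit t.toList = true) :
    loopA (t :: rs) false p acc = loopA rs false false (acc ++ [PP.i (intOf t)]) := by
  have h2 : t ≠ "o" := by rintro rfl; revert h; decide
  have h3 : t ≠ "b" := by rintro rfl; revert h; decide
  have h4 : t ≠ "$" := by rintro rfl; revert h; decide
  have h5 : t ≠ "!" := by rintro rfl; revert h; decide
  simp [loopA, h, h2, h3, h4, h5]

theorem loopA_cons_o (rs : List String) (p : Bool) (acc : List PP) :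
    loopA ("o" :: rs) false p acc
      = loopA rs false true (acc ++ (if p then [PP.i 1, PP.b true] else [PP.b true])) := by
  have h : PySem.Chars.strIsdigit ['o'] = false := by decide
  cases p <;> simp [loopA, h]

theorem loopA_cons_b (rs : List String) (p : Bool) (acc : List PP) :
    loopA ("b" :: rs) false p acc
      = loopA rs false true (acc ++ (if p then [PP.i 1, PP.b false] else [PP.b false])) := by
  have h : PySem.Chars.strIsdigit ['b'] = false := by decide
  cases p <;> simp [loopA, h]

theorem loopA_cons_dollar (rs : List String) (p : Bool) (acc : List PP) :
    loopA ("$" :: rs) false p acc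
      = loopA rs false true (acc ++ (if p then [PP.i 1, PP.crlf] else [PP.crlf])) := by
  have h : PySem.Chars.strIsdigit ['$'] = false := by decide
  cases p <;> simp [loopA, h]

theorem loopA_cons_bang (rs : List String) (p : Bool) (acc : List PP) :
    loopA ("!" :: rs) false p acc = acc ++ [PP.i 1, PP.eof] := by
  have h : PySem.Chars.strIsdigit ['!'] = false := by decide
  simp [loopA, h]

theorem loopA_cons_other (t : String) (rs : List String) (p : Bool) (acc : List PP)
    (h1 : PySem.Chars.strIsdigit t.toList = false) (h2 : t ≠ "o") (h3 : t ≠ "b")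
    (h4 : t ≠ "$") (h5 : t ≠ "!") :
    loopA (t :: rs) false p acc = loopA rs false true acc := by
  simp [loopA, h1, h2, h3, h4, h5]

theorem loopA_acc (l : List String) : ∀ (pstr : Bool) (acc : List PP),
    loopA l false pstr acc = acc ++ loopA l false pstr [] := by
  induction l with
  | nil => intro p acc; simp [loopA]
  | cons t rs ih =>
    intro p acc
    by_cases h1 : PySem.Chars.strIsdigit t.toList = true
    · rw [loopA_cons_digit t rs p acc h1, loopA_cons_digit t rs p [] h1,
        ih false (acc ++ [PP.i (intOf t)]), ih false ([] ++ [PP.i (intOf t)])]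
      simp
    · have h1' : PySem.Str.strIsdigit t = false := by
        cases hx : PySem.Str.strIsdigit t with
        | true => exact absurd hx h1
        | false => rfl
      by_cases h2 : t = "o"
      · subst h2
        rw [loopA_cons_o rs p acc, loopA_cons_o rs p [],
          ih true (acc ++ _), ih true ([] ++ _)]
        simp
      · by_cases h3 : t = "b"
        · subst h3
          rw [loopA_cons_b rs p acc, loopA_cons_b rs p [],
            ih true (acc ++ _), ih true ([] ++ _)]
          simp
        · by_cases h4 : t = "$"
          · subst h4
            rw [loopA_cons_dollar rs p acc, loopA_cons_dollar rs p [],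
              ih true (acc ++ _), ih true ([] ++ _)]
            simp
          · by_cases h5 : t = "!"
            · subst h5
              rw [loopA_cons_bang rs p acc, loopA_cons_bang rs p []]
              simp
            · rw [loopA_cons_other t rs p acc h1' h2 h3 h4 h5,
                loopA_cons_other t rs p [] h1' h2 h3 h4 h5, ih true acc]

def tailT (bang : Bool) : List PP := if bang then [] else [PP.i 1, PP.eof]

def finB (bang : Bool) (st : List (List Bool) × List Bool) : List (List Bool) :=
  if bang then st.1 else st.1 ++ [st.2]

theorem main_loop (rest : List String) :
    ∀ (bang : Bool) (count : Int) (p : Option PP) (pstr : Bool)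
      (row : List Bool) (mat : List (List Bool)),
      ((pstr = true ∧ count = 1) ∨ (pstr = false ∧ p = some (PP.i count))) →
      (runP (loopA rest false pstr [] ++ tailT bang) (p, row, mat)).2.2
        = finB bang (goB rest count row mat) := by
  induction rest with
  | nil =>
    intro bang count p pstr row mat _
    cases bang <;>
      simp [loopA, tailT, finB, goB, runP, stepP, ppPrevInt]
  | cons t rs ih =>
    intro bang count p pstr row mat hmode
    by_cases h1 : PySem.Chars.strIsdigit t.toList = true
    · rw [loopA_cons_digit t rs pstr [] h1, loopA_acc rs false]
      simp only [List.nil_append, List.cons_append, List.singleton_append]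
      rw [runP_cons]
      simp only [stepP]
      rw [ih bang (intOf t) (some (PP.i (intOf t))) false row mat (Or.inr ⟨rfl, rfl⟩)]
      simp [goB, h1]
    · have h1' : PySem.Str.strIsdigit t = false := by
        cases hx : PySem.Str.strIsdigit t with
        | true => exact absurd hx h1
        | false => rfl
      by_cases h2 : t = "o"
      · subst h2
        rcases hmode with ⟨rfl, rfl⟩ | ⟨rfl, rfl⟩
        · rw [loopA_cons_o rs true [], loopA_acc rs true]
          simp only [if_true, List.nil_append, List.cons_append, List.singleton_append]
          rw [runP_cons, runP_cons]
          simp only [stepP, ppIsInt, ppToInt, if_pos rfl]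
          rw [ih bang 1 (some (PP.b true)) true _ mat (Or.inl ⟨rfl, rfl⟩)]
          have hc : PySem.Chars.strIsdigit ['o'] = false := by decide
          simp [goB, hc]
        · rw [loopA_cons_o rs false [], loopA_acc rs true]
          simp only [Bool.false_eq_true, if_false, List.nil_append, List.cons_append,
            List.singleton_append]
          rw [runP_cons]
          simp only [stepP, ppIsInt, ppToInt, if_pos rfl]
          rw [ih bang 1 (some (PP.b true)) true _ mat (Or.inl ⟨rfl, rfl⟩)]
          have hc : PySem.Chars.strIsdigit ['o'] = false := by decide
          simp [goB, hc]
      · by_cases h3 : t = "b"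
        · subst h3
          rcases hmode with ⟨rfl, rfl⟩ | ⟨rfl, rfl⟩
          · rw [loopA_cons_b rs true [], loopA_acc rs true]
            simp only [if_true, List.nil_append, List.cons_append, List.singleton_append]
            rw [runP_cons, runP_cons]
            simp only [stepP, ppIsInt, ppToInt, if_pos rfl]
            rw [ih bang 1 (some (PP.b false)) true _ mat (Or.inl ⟨rfl, rfl⟩)]
            have hc : PySem.Chars.strIsdigit ['b'] = false := by decide
            simp [goB, hc]
          · rw [loopA_cons_b rs false [], loopA_acc rs true]
            simp only [Bool.false_eq_true, if_false, List.nil_append, List.cons_append,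
              List.singleton_append]
            rw [runP_cons]
            simp only [stepP, ppIsInt, ppToInt, if_pos rfl]
            rw [ih bang 1 (some (PP.b false)) true _ mat (Or.inl ⟨rfl, rfl⟩)]
            have hc : PySem.Chars.strIsdigit ['b'] = false := by decide
            simp [goB, hc]
        · by_cases h4 : t = "$"
          · subst h4
            rcases hmode with ⟨rfl, rfl⟩ | ⟨rfl, rfl⟩
            · rw [loopA_cons_dollar rs true [], loopA_acc rs true]
              simp only [if_true, List.nil_append, List.cons_append, List.singleton_append]
              rw [runP_cons, runP_cons]
              simp only [stepP, ppPrevInt]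
              rw [ih bang 1 (some PP.crlf) true [] _ (Or.inl ⟨rfl, rfl⟩)]
              have hc : PySem.Chars.strIsdigit ['$'] = false := by decide
              simp [goB, hc]
            · rw [loopA_cons_dollar rs false [], loopA_acc rs true]
              simp only [Bool.false_eq_true, if_false, List.nil_append, List.cons_append,
                List.singleton_append]
              rw [runP_cons]
              simp only [stepP, ppPrevInt]
              rw [ih bang 1 (some PP.crlf) true [] _ (Or.inl ⟨rfl, rfl⟩)]
              have hc : PySem.Chars.strIsdigit ['$'] = false := by decide
              simp [goB, hc]
          · by_cases h5 : t = "!"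
            · subst h5
              rw [loopA_cons_bang rs pstr []]
              have hc : PySem.Chars.strIsdigit ['!'] = false := by decide
              cases bang <;>
                simp [tailT, finB, goB, hc, runP, stepP, ppPrevInt]
            · rw [loopA_cons_other t rs pstr [] h1' h2 h3 h4 h5]
              have hres := ih bang 1 p true row mat (Or.inl ⟨rfl, rfl⟩)
              rw [hres]
              simp [goB, h1, h2, h3, h4, h5]

theorem loopA_first (t : String) (rs : List String) (h : t ≠ "$") :
    loopA (t :: rs) true false [] = loopA (t :: rs) false true [] := by
  simp [loopA, h]

theorem parse_spec : Claim_equal_parse := by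
  intro tokens _ hpre
  unfold Spec_parse
  obtain ⟨hne, hhd⟩ := hpre
  match tokens with
  | [] => exact absurd rfl hne
  | t :: rs =>
    have ht : t ≠ "$" := fun h => hhd (by simp [h])
    show parse (t :: rs) = parse_alt (t :: rs)
    unfold parse parse_alt
    by_cases hb : (t :: rs).getLast? = some "!"
    · simp only [if_pos hb]
      have hbr := bridge (loopA (t :: rs) true false []) none [] []
      rw [extP_none, List.append_nil] at hbr
      rw [hbr, loopA_first t rs ht, ← List.append_nil (loopA (t :: rs) false true [])]
      have := main_loop (t :: rs) true 1 none true [] [] (Or.inl ⟨rfl, rfl⟩)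
      simpa [tailT, finB] using this
    · simp only [if_neg hb]
      have hbr := bridge (loopA (t :: rs) true false [] ++ [PP.i 1, PP.eof]) none [] []
      rw [extP_none, List.append_nil] at hbr
      rw [hbr, loopA_first t rs ht]
      have := main_loop (t :: rs) false 1 none true [] [] (Or.inl ⟨rfl, rfl⟩)
      simpa [tailT, finB] using this
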